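-- pv_equiv track=rewrite | github.com/TheControlEngineer/spacecraft-setpoint-shaping | scripts/run_mission.py | _infer_controller_from_control_mode
-- ===== SOURCE A (Python) =====
-- from typing import Dict, Iterable, List, Optional, Tuple
--
-- def _infer_controller_from_control_mode(control_mode: Optional[List[object]]) -> Optional[str]:
--     """Infer controller type from control mode strings."""
--     if not control_mode:
--         return None
--     modes = [str(mode) for mode in control_mode]
--     if any("FB(FILT)" in mode or "Filtered" in mode for mode in modes):
--         return "filtered_pd"
--     if any("FB(MRP)" in mode or "MRP" in mode for mode in modes):
--         return "standard_pd"
--     return None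
-- ===== SOURCE B (Python) =====
-- def _infer_controller_from_control_mode(control_mode):
--     """Infer controller type from control mode strings."""
--     if not control_mode:
--         return None
--     saw_standard = False
--     for mode in control_mode:
--         s = str(mode)
--         if "FB(FILT)" in s or "Filtered" in s:
--             return "filtered_pd"
--         if "FB(MRP)" in s or "MRP" in s:
--             saw_standard = True
--     return "standard_pd" if saw_standard else None
-- ===== Notes on version B (the rewrite author's own statement) =====
-- stated objective: alternative
-- what changed: Replaced A's two separate any() scans over a precomputed list with one explicit single pass that returns filtered_pd immediately and defers the standard_pd decision to a boolean flag.
import Mathlib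
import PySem

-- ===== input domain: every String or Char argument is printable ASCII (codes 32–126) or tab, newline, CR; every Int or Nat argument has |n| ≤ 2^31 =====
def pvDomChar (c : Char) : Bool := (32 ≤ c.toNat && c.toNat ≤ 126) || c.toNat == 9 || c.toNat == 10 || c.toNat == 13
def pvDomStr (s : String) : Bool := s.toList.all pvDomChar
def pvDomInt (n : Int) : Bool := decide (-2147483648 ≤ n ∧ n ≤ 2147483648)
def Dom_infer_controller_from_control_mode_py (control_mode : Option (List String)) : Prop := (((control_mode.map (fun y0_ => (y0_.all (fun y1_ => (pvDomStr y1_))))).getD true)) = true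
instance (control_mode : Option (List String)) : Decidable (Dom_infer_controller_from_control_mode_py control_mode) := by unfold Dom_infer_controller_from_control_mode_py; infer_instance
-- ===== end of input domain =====

-- B: one explicit single pass with a deferred saw_standard flag instead of two any() scans (alternative decomposition, same cost).


-- ===== PORT A =====
-- any("FB(FILT)" in mode or "Filtered" in mode for mode in modes)
def pvA_isFiltered (m : String) : Bool := PySem.Str.isIn "FB(FILT)" m || PySem.Str.isIn "Filtered" m
-- any("FB(MRP)" in mode or "MRP" in mode for mode in modes)
def pvA_isStandard (m : String) : Bool := PySem.Str.isIn "FB(MRP)" m || PySem.Str.isIn "MRP" m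

def infer_controller_from_control_mode_py (control_mode : Option (List String)) : Option String :=
  match control_mode with
  | none => none
  | some l =>
    if l.isEmpty then none    -- `if not control_mode`
    else
      let modes := l.map (fun mode => mode)   -- str(mode) is the identity on strings
      if modes.any pvA_isFiltered then some "filtered_pd"
      else if modes.any pvA_isStandard then some "standard_pd"
      else none

-- ===== PORT B =====
-- the single explicit loop of B, carrying the saw_standard flag
def pvB_loop : List String → Bool → Option String
  | [], saw_standard => if saw_standard then some "standard_pd" else none
  | mode :: rest, saw_standard =>
    if PySem.Str.isIn "FB(FILT)" mode || PySem.Str.isIn "Filtered" mode then some "filtered_pd"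
    else pvB_loop rest (saw_standard || (PySem.Str.isIn "FB(MRP)" mode || PySem.Str.isIn "MRP" mode))

def infer_controller_from_control_mode_py_alt (control_mode : Option (List String)) : Option String :=
  match control_mode with
  | none => none
  | some l =>
    if l.isEmpty then none    -- `if not control_mode`
    else pvB_loop l false

-- ===== PRECONDITION & SPEC =====
def Spec_infer_controller_from_control_mode_py (control_mode : Option (List String)) (out : Option String) : Prop := out = infer_controller_from_control_mode_py_alt control_mode
instance (control_mode : Option (List String)) (out : Option String) : Decidable (Spec_infer_controller_from_control_mode_py control_mode out) := by unfold Spec_infer_controller_from_control_mode_py; infer_instance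

-- ===== CLAIM (what is proved, stated in full; the proofs are below) =====
def Claim_equal_infer_controller_from_control_mode_py : Prop := ∀ (control_mode : Option (List String)), Dom_infer_controller_from_control_mode_py control_mode → Spec_infer_controller_from_control_mode_py control_mode (infer_controller_from_control_mode_py control_mode)

-- ===== LEMMAS AND PROOFS =====

-- ===== VERDICT (by name: the statement is the Claim_ definition above) =====
-- the loop of B computes exactly A's two-scan result, for any incoming flag
theorem pvB_loop_eq (l : List String) (saw : Bool) :
    pvB_loop l saw =
      (if l.any pvA_isFiltered then some "filtered_pd"
       else if saw || l.any pvA_isStandard then some "standard_pd" else none) := by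
  induction l generalizing saw with
  | nil => simp [pvB_loop]
  | cons m rest ih =>
    have hf' : (PySem.Str.isIn "FB(FILT)" m || PySem.Str.isIn "Filtered" m) = pvA_isFiltered m := rfl
    have hs' : (PySem.Str.isIn "FB(MRP)" m || PySem.Str.isIn "MRP" m) = pvA_isStandard m := rfl
    simp only [pvB_loop, List.any_cons, hf', hs']
    by_cases hf : pvA_isFiltered m <;> simp [hf, ih, Bool.or_assoc]

theorem infer_controller_from_control_mode_py_spec : Claim_equal_infer_controller_from_control_mode_py := by
  intro cm _
  unfold Spec_infer_controller_from_control_mode_py infer_controller_from_control_mode_py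
    infer_controller_from_control_mode_py_alt
  match cm with
  | none => rfl
  | some l =>
    by_cases h : l.isEmpty <;>
      simp [h, pvB_loop_eq, pvA_isFiltered, pvA_isStandard]
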